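-- pv_equiv track=rewrite | github.com/SEdeepL/GraphLoRA | ground-truth/test_withgt.py | clean_patch_text
-- ===== SOURCE A (Python) =====
-- from typing import Dict, Any, List, Optional
--
-- def clean_patch_text(raw: str) -> str:
--     """
--     清洗 patch 文本：
--     - 每行去掉右侧多余空格
--     - 去掉开头/结尾空行
--     - 连续空行压缩为 1 行
--     """
--     lines = raw.splitlines()
--
--     # 去掉每行右侧空格
--     lines = [line.rstrip() for line in lines]
--
--     # 去掉开头空行
--     while lines and not lines[0].strip():
--         lines.pop(0)
--
--     # 去掉结尾空行
--     while lines and not lines[-1].strip():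
--         lines.pop()
--
--     # 连续空行压成一行
--     cleaned_lines: List[str] = []
--     prev_blank = False
--     for line in lines:
--         is_blank = (not line.strip())
--         if is_blank and prev_blank:
--             continue
--         cleaned_lines.append(line)
--         prev_blank = is_blank
--
--     return "\n".join(cleaned_lines)
-- ===== SOURCE B (Python) =====
-- def clean_patch_text(raw: str) -> str:
--     """One-pass cleanup: rstrip each line, buffer at most one blank line
--     (only after content has appeared), flush the buffer before content."""
--     out = []
--     seen_content = False
--     pending_blank = False
--     for line in (l.rstrip() for l in raw.splitlines()):
--         if line == "":
--             if seen_content: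
--                 pending_blank = True
--         else:
--             if pending_blank:
--                 out.append("")
--                 pending_blank = False
--             out.append(line)
--             seen_content = True
--     return "\n".join(out)
-- ===== Notes on version B (the rewrite author's own statement) =====
-- stated objective: simpler
-- what changed: Replaced A's four-pass pipeline (rstrip map, pop leading blanks, pop trailing blanks, collapse fold) by a single pass over the lines with two booleans (seen_content, pending_blank) that simultaneously drops edge blanks and collapses blank runs.
import Mathlib
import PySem

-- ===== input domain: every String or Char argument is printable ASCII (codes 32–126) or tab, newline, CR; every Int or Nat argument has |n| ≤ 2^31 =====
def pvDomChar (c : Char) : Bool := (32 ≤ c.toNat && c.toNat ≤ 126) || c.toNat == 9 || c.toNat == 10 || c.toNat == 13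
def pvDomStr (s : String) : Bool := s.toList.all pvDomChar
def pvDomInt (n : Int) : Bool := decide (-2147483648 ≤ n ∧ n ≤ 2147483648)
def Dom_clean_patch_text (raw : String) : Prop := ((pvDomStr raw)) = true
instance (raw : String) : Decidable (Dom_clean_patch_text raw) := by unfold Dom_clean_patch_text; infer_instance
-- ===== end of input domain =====

-- B replaces A's four-pass pipeline (rstrip map, pop leading blanks, pop trailing blanks,
-- collapse fold) by one pass with two booleans; objective: simpler.

-- ===== PORT A =====
-- `not line.strip()`
def pvBlankA (s : String) : Bool := PySem.Str.strip s == ""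

-- `while lines and not lines[0].strip(): lines.pop(0)`
def pvDropLead : List String → List String
  | [] => []
  | l :: t => if pvBlankA l then pvDropLead t else l :: t

-- `while lines and not lines[-1].strip(): lines.pop()`
def pvDropTrail (ls : List String) : List String :=
  match h : ls.getLast? with
  | some l => if pvBlankA l then pvDropTrail ls.dropLast else ls
  | none => ls
termination_by ls.length
decreasing_by
  have hne : ls ≠ [] := by intro e; subst e; simp at h
  have := List.length_pos_iff.mpr hne
  simp [List.length_dropLast]; omega

-- the collapse loop with `prev_blank` and `cleaned_lines`
def pvCollapse (ls : List String) : List String :=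
  (ls.foldl (fun (st : Bool × List String) line =>
      let isBlank := pvBlankA line
      if isBlank && st.1 then st else (isBlank, st.2 ++ [line]))
    (false, ([] : List String))).2

def clean_patch_text (raw : String) : String :=
  let lines := (PySem.Str.splitlines raw).map PySem.Str.rstrip
  PySem.Str.join "\n" (pvCollapse (pvDropTrail (pvDropLead lines)))

-- ===== PORT B =====
def clean_patch_text_alt (raw : String) : String :=
  let st := (PySem.Str.splitlines raw).foldl
    (fun (st : Bool × Bool × List String) l =>
      let line := PySem.Str.rstrip l
      if line == "" then
        (st.1, if st.1 then true else st.2.1, st.2.2)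
      else
        (true, false, st.2.2 ++ (if st.2.1 then ["", line] else [line])))
    (false, false, ([] : List String))
  PySem.Str.join "\n" st.2.2

-- ===== PRECONDITION & SPEC =====
def Spec_clean_patch_text (raw : String) (out : String) : Prop := out = clean_patch_text_alt raw
instance (raw : String) (out : String) : Decidable (Spec_clean_patch_text raw out) := by unfold Spec_clean_patch_text; infer_instance

-- ===== CLAIM (what is proved, stated in full; the proofs are below) =====
def Claim_equal_clean_patch_text : Prop := ∀ (raw : String), Dom_clean_patch_text raw → Spec_clean_patch_text raw (clean_patch_text raw)

-- ===== LEMMAS AND PROOFS =====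

-- recursion view of A's collapse fold
def pvC : Bool → List String → List String
  | _, [] => []
  | prev, l :: t => if pvBlankA l && prev then pvC prev t else l :: pvC (pvBlankA l) t

-- recursion view of B's one-pass fold
def pvG : Bool → Bool → List String → List String
  | _, _, [] => []
  | seen, pend, l :: t =>
    if l == "" then pvG seen (if seen then true else pend) t
    else (if pend then ["", l] else [l]) ++ pvG true false t

-- "remove the maximal blank suffix"
def pvR (ls : List String) : List String := (ls.reverse.dropWhile pvBlankA).reverse

-- on every rstripped string, A's blank test (strip == "") agrees with B's (== "")
def pvH (ls : List String) : Prop := ∀ l ∈ ls, pvBlankA l = (l == "")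

lemma rstrip_nil_iff (w : List Char) :
    PySem.Chars.rstrip w = [] ↔ ∀ c ∈ w, PySem.Chars.isspace c = true := by
  unfold PySem.Chars.rstrip
  simp [List.dropWhile_eq_nil_iff]

lemma chars_strip_rstrip_nil (cs : List Char) :
    (PySem.Chars.strip (PySem.Chars.rstrip cs) = []) ↔ (PySem.Chars.rstrip cs = []) := by
  constructor
  · intro h
    unfold PySem.Chars.strip at h
    rw [rstrip_nil_iff] at h
    have hl : PySem.Chars.lstrip (PySem.Chars.rstrip cs) = [] := by
      by_contra hne
      have hne' : List.dropWhile PySem.Chars.isspace (PySem.Chars.rstrip cs) ≠ [] := by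
        simpa [PySem.Chars.lstrip] using hne
      have h1 := List.head_dropWhile_not PySem.Chars.isspace hne'
      have h2 := h _ (show (List.dropWhile PySem.Chars.isspace (PySem.Chars.rstrip cs)).head hne' ∈
          PySem.Chars.lstrip (PySem.Chars.rstrip cs) by
        unfold PySem.Chars.lstrip; exact List.head_mem hne')
      rw [h2] at h1; exact Bool.noConfusion h1
    have hall : ∀ c ∈ PySem.Chars.rstrip cs, PySem.Chars.isspace c = true := by
      simpa [PySem.Chars.lstrip, List.dropWhile_eq_nil_iff] using hl
    by_contra hne
    have hne' : List.dropWhile PySem.Chars.isspace cs.reverse ≠ [] := by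
      intro hh; apply hne; unfold PySem.Chars.rstrip; simp [hh]
    have h1 := List.head_dropWhile_not PySem.Chars.isspace hne'
    have h2 := hall _ (show (List.dropWhile PySem.Chars.isspace cs.reverse).head hne' ∈
        PySem.Chars.rstrip cs by
      unfold PySem.Chars.rstrip; rw [List.mem_reverse]; exact List.head_mem hne')
    rw [h2] at h1; exact Bool.noConfusion h1
  · intro h; rw [h]; rfl

lemma blank_agree (s : String) :
    pvBlankA (PySem.Str.rstrip s) = (PySem.Str.rstrip s == "") := by
  have h := chars_strip_rstrip_nil s.toList
  unfold pvBlankA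
  cases h1 : PySem.Str.strip (PySem.Str.rstrip s) == "" <;>
    cases h2 : PySem.Str.rstrip s == "" <;> simp_all [← String.toList_inj,
      PySem.Str.toList_strip, PySem.Str.toList_rstrip]

def pvStepA (st : Bool × List String) (line : String) : Bool × List String :=
  if pvBlankA line && st.1 then st else (pvBlankA line, st.2 ++ [line])

lemma stepA_tt (acc : List String) (l : String) (h : pvBlankA l = true) :
    pvStepA (true, acc) l = (true, acc) := by simp [pvStepA, h]

lemma stepA_tf (acc : List String) (l : String) (h : pvBlankA l = true) :
    pvStepA (false, acc) l = (true, acc ++ [l]) := by simp [pvStepA, h]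

lemma stepA_f (p : Bool) (acc : List String) (l : String) (h : pvBlankA l = false) :
    pvStepA (p, acc) l = (false, acc ++ [l]) := by simp [pvStepA, h]

-- A's collapse fold computes pvC
lemma collapse_bridge (ls : List String) (prev : Bool) (acc : List String) :
    (ls.foldl pvStepA (prev, acc)).2 = acc ++ pvC prev ls := by
  induction ls generalizing prev acc with
  | nil => simp [pvC]
  | cons l t ih =>
    cases hbl : pvBlankA l
    · rw [List.foldl_cons, stepA_f _ _ _ hbl, ih]
      simp [pvC, hbl]
    · cases prev
      · rw [List.foldl_cons, stepA_tf _ _ hbl, ih]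
        simp [pvC, hbl]
      · rw [List.foldl_cons, stepA_tt _ _ hbl, ih]
        simp [pvC, hbl]

def pvStepB (st : Bool × Bool × List String) (line : String) : Bool × Bool × List String :=
  if line == "" then (st.1, if st.1 then true else st.2.1, st.2.2)
  else (true, false, st.2.2 ++ (if st.2.1 then ["", line] else [line]))

lemma stepB_blank (s p : Bool) (acc : List String) (l : String) (h : (l == "") = true) :
    pvStepB (s, p, acc) l = (s, if s then true else p, acc) := by simp [pvStepB, h]

lemma stepB_nb (s p : Bool) (acc : List String) (l : String) (h : (l == "") = false) :
    pvStepB (s, p, acc) l = (true, false, acc ++ (if p then ["", l] else [l])) := by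
  simp [pvStepB, h]

-- B's one-pass fold computes pvG
lemma alt_bridge (ms : List String) (s p : Bool) (acc : List String) :
    (ms.foldl pvStepB (s, p, acc)).2.2 = acc ++ pvG s p ms := by
  induction ms generalizing s p acc with
  | nil => simp [pvG]
  | cons l t ih =>
    cases hbl : l == ""
    · rw [List.foldl_cons, stepB_nb _ _ _ _ hbl, ih]
      simp [pvG, hbl]
    · rw [List.foldl_cons, stepB_blank _ _ _ _ hbl, ih]
      simp [pvG, hbl]

-- pvDropTrail is "drop the maximal blank suffix"
lemma dropTrail_eq_pvR (ls : List String) : pvDropTrail ls = pvR ls := by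
  induction ls using List.reverseRecOn with
  | nil => rw [pvDropTrail]; rfl
  | append_singleton xs l ih =>
    rw [pvDropTrail]
    split
    · rename_i l' h
      have hl : l = l' := by simpa using h
      subst hl
      by_cases hb : pvBlankA l = true
      · rw [if_pos hb, show (xs ++ [l]).dropLast = xs by simp, ih]
        simp [pvR, List.dropWhile_cons, hb]
      · rw [if_neg hb]
        have hb' : pvBlankA l = false := by cases hx : pvBlankA l; rfl; exact absurd hx hb
        simp [pvR, List.dropWhile_cons, hb']
    · rename_i h
      simp at h

lemma pvR_allblank (ls : List String) (h : ∀ l ∈ ls, pvBlankA l = true) : pvR ls = [] := by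
  unfold pvR
  rw [List.dropWhile_eq_nil_iff.mpr (by intro x hx; exact h x (List.mem_reverse.mp hx))]
  rfl

lemma pvR_cons (a : String) (t : List String)
    (h : pvBlankA a = false ∨ ∃ l ∈ t, pvBlankA l = false) :
    pvR (a :: t) = a :: pvR t := by
  unfold pvR
  rw [List.reverse_cons, List.dropWhile_append]
  by_cases he : List.dropWhile pvBlankA t.reverse = []
  · have hall : ∀ l ∈ t, pvBlankA l = true := by
      intro l hl
      exact List.dropWhile_eq_nil_iff.mp he l (List.mem_reverse.mpr hl)
    have ha : pvBlankA a = false := by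
      rcases h with h | ⟨l, hl, hf⟩
      · exact h
      · rw [hall l hl] at hf; exact Bool.noConfusion hf
    simp [he, List.dropWhile_cons, ha]
  · simp [List.isEmpty_iff, he]

lemma pvG_allblank : ∀ (t : List String), pvH t → (∀ l ∈ t, pvBlankA l = true) →
    ∀ (s p : Bool), pvG s p t = [] := by
  intro t
  induction t with
  | nil => intro _ _ s p; rfl
  | cons l t ih =>
    intro hH h s p
    have hb : (l == "") = true := by
      rw [← hH l List.mem_cons_self]; exact h l List.mem_cons_self
    simp only [pvG, hb, if_pos]
    exact ih (fun x hx => hH x (List.mem_cons_of_mem _ hx))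
      (fun x hx => h x (List.mem_cons_of_mem _ hx)) _ _

-- the heart: A's trim-then-collapse equals B's buffered pass, after content started
lemma middle (t : List String) (hH : pvH t) :
    pvC false (pvR t) = pvG true false t ∧
    ((∃ l ∈ t, pvBlankA l = false) → "" :: pvC true (pvR t) = pvG true true t) := by
  induction t with
  | nil => exact ⟨rfl, by rintro ⟨l, hl, -⟩; exact absurd hl (List.not_mem_nil)⟩
  | cons l t ih =>
    have hHt : pvH t := fun x hx => hH x (List.mem_cons_of_mem _ hx)
    obtain ⟨ih2, ih1⟩ := ih hHt
    have hol := hH l List.mem_cons_self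
    by_cases hb : pvBlankA l = true
    · -- head blank, hence l = ""
      have hbl : (l == "") = true := by rw [← hol]; exact hb
      have hl0 : l = "" := by simpa using hbl
      constructor
      · by_cases hex : ∃ x ∈ t, pvBlankA x = false
        · rw [pvR_cons l t (Or.inr hex)]
          simp only [pvC, hb, Bool.and_false, if_neg Bool.false_ne_true, hb]
          simp only [pvG, hbl, if_pos, if_pos rfl]
          rw [hl0]
          exact ih1 hex
        · push_neg at hex
          have hall : ∀ x ∈ l :: t, pvBlankA x = true := by
            intro x hx
            rcases List.mem_cons.mp hx with rfl | hx
            · exact hb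
            · cases hxx : pvBlankA x
              · exact absurd hxx (by simpa using hex x hx)
              · rfl
          rw [pvR_allblank _ hall]
          simp only [pvC, pvG, hbl, if_pos, if_pos rfl]
          exact (pvG_allblank t hHt (fun x hx => hall x (List.mem_cons_of_mem _ hx)) _ _).symm
      · rintro hex
        have hex' : ∃ x ∈ t, pvBlankA x = false := by
          rcases hex with ⟨x, hx, hf⟩
          rcases List.mem_cons.mp hx with rfl | hx
          · rw [hb] at hf; exact Bool.noConfusion hf
          · exact ⟨x, hx, hf⟩
        rw [pvR_cons l t (Or.inr hex')]
        simp only [pvC, hb, Bool.and_true, if_pos rfl]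
        simp only [pvG, hbl, if_pos, if_pos rfl]
        exact ih1 hex'
    · -- head non-blank
      have hb' : pvBlankA l = false := by cases h : pvBlankA l; rfl; exact absurd h hb
      have hbl : (l == "") = false := by rw [← hol]; exact hb'
      rw [pvR_cons l t (Or.inl hb')]
      constructor
      · simp only [pvC, hb', Bool.false_and, if_neg Bool.false_ne_true]
        simp only [pvG, hbl, Bool.false_eq_true, if_neg, if_neg Bool.false_ne_true]
        simp [ih2]
      · intro _
        simp only [pvC, hb', Bool.false_and, if_neg Bool.false_ne_true]
        simp only [pvG, hbl, Bool.false_eq_true, if_neg, if_pos rfl]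
        simp [ih2]

lemma main_lemma (ms : List String) (hH : pvH ms) :
    pvC false (pvR (pvDropLead ms)) = pvG false false ms := by
  induction ms with
  | nil => rfl
  | cons l t ih =>
    have hHt : pvH t := fun x hx => hH x (List.mem_cons_of_mem _ hx)
    have hol := hH l List.mem_cons_self
    by_cases hb : pvBlankA l = true
    · have hbl : (l == "") = true := by rw [← hol]; exact hb
      rw [show pvDropLead (l :: t) = pvDropLead t from by simp [pvDropLead, hb]]
      simp only [pvG, hbl, if_pos]
      simpa using ih hHt
    · have hb' : pvBlankA l = false := by cases h : pvBlankA l; rfl; exact absurd h hb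
      have hbl : (l == "") = false := by rw [← hol]; exact hb'
      rw [show pvDropLead (l :: t) = l :: t from by simp [pvDropLead, hb'],
        pvR_cons l t (Or.inl hb')]
      simp only [pvC, hb', Bool.false_and, if_neg Bool.false_ne_true]
      simp only [pvG, hbl, Bool.false_eq_true, if_neg, if_neg Bool.false_ne_true]
      simp [(middle t hHt).1]

-- ===== VERDICT (by name: the statement is the Claim_ definition above) =====
theorem clean_patch_text_spec : Claim_equal_clean_patch_text := by
  intro raw _
  unfold Spec_clean_patch_text clean_patch_text clean_patch_text_alt
  have hH : pvH ((PySem.Str.splitlines raw).map PySem.Str.rstrip) := by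
    intro l hl
    obtain ⟨x, -, rfl⟩ := List.mem_map.mp hl
    exact blank_agree x
  show PySem.Str.join "\n"
      (pvCollapse (pvDropTrail (pvDropLead ((PySem.Str.splitlines raw).map PySem.Str.rstrip))))
    = PySem.Str.join "\n"
      ((List.foldl (fun st l => pvStepB st (PySem.Str.rstrip l))
        (false, false, ([] : List String)) (PySem.Str.splitlines raw)).2.2)
  congr 1
  rw [show pvCollapse (pvDropTrail (pvDropLead ((PySem.Str.splitlines raw).map PySem.Str.rstrip)))
      = (List.foldl pvStepA (false, [])
          (pvDropTrail (pvDropLead ((PySem.Str.splitlines raw).map PySem.Str.rstrip)))).2 from rfl,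
    collapse_bridge, dropTrail_eq_pvR, List.nil_append, main_lemma _ hH,
    ← List.foldl_map, alt_bridge, List.nil_append]
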